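-- pv_equiv track=rewrite | github.com/ikokkari/PythonProblems | labs109.py | mcculloch
-- ===== SOURCE A (Python) =====
-- def mcculloch(digits):
--     if len(digits) > 1:
--         head, tail = digits[0], digits[1:]
--         if head == '2':
--             return tail
--         if head in '345':
--             value = mcculloch(tail)
--             if value:
--                 if head == '3':
--                     return f"{value}2{value}"
--                 elif head == '4':
--                     return value[::-1]
--                 elif head == '5':
--                     return f"{value}{value}"
-- ===== SOURCE B (Python) =====
-- def mcculloch(digits):
--     ops = []
--     i = 0
--     value = None
--     while True:
--         if len(digits) - i <= 1:
--             break
--         head = digits[i]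
--         if head == '2':
--             value = digits[i+1:]
--             break
--         if head in '345':
--             ops.append(head)
--             i += 1
--         else:
--             break
--     if value is None:
--         return None
--     for op in reversed(ops):
--         if op == '3':
--             value = f"{value}2{value}"
--         elif op == '4':
--             value = value[::-1]
--         else:
--             value = value + value
--     return value
-- ===== Notes on version B (the rewrite author's own statement) =====
-- stated objective: alternative
-- what changed: Replaces A's descend-then-rebuild recursion with an explicit left-to-right scan that collects the '345' operator prefix and finds the '2' base value, followed by a reverse fold applying the collected operators; both are linear in the number of operators but B is iterative and non-recursive.
import Mathlib
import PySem

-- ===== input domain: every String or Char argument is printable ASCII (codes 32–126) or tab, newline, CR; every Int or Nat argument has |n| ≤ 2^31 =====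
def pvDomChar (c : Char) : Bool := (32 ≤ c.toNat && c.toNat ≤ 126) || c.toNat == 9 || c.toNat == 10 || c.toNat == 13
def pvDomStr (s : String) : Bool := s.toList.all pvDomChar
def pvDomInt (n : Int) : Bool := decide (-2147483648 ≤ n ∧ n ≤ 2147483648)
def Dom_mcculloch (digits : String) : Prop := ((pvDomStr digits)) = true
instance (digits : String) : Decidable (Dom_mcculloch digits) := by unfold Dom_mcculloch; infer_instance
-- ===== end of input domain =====

-- B replaces A's descend-then-rebuild recursion by an explicit scan collecting the
-- operator prefix plus a reverse fold applying it; same cost, different decomposition.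

-- ===== PORT A =====
-- A's recursion on the digit string, over List Char (digits[0]/digits[1:] = head/tail).
def mccA : List Char → Option (List Char)
  | [] => none
  | [_] => none
  | h :: t =>
    if h = '2' then some t
    else if h = '3' ∨ h = '4' ∨ h = '5' then
      match mccA t with
      | some v =>
        -- Python 'if value:' — true iff non-None and nonempty
        if v.isEmpty then none
        else if h = '3' then some (v ++ '2' :: v)
        else if h = '4' then some v.reverse
        else some (v ++ v)
      | none => none
    else none

def mcculloch (digits : String) : Option String :=
  (mccA digits.toList).map String.ofList

-- ===== PORT B =====
-- Source B's while-loop: scan left to right, collect '345' heads, stop at '2' (base value),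
-- at suffix length ≤ 1, or at a foreign head.  Returns (collected ops, optional base).
def scanB : List Char → List Char × Option (List Char)
  | [] => ([], none)
  | [_] => ([], none)
  | h :: t =>
    if h = '2' then ([], some t)
    else if h = '3' ∨ h = '4' ∨ h = '5' then
      let (ops, v) := scanB t
      (h :: ops, v)
    else ([], none)

-- Source B's loop body 'for op in reversed(ops)'
def applyOp (v : List Char) (op : Char) : List Char :=
  if op = '3' then v ++ '2' :: v
  else if op = '4' then v.reverse
  else v ++ v

def mcculloch_alt (digits : String) : Option String :=
  match scanB digits.toList with
  | (_, none) => none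
  | (ops, some v) => some (String.ofList (ops.reverse.foldl applyOp v))

-- ===== PRECONDITION & SPEC =====
def Spec_mcculloch (digits : String) (out : Option String) : Prop := out = mcculloch_alt digits
instance (digits : String) (out : Option String) : Decidable (Spec_mcculloch digits out) := by unfold Spec_mcculloch; infer_instance

-- ===== CLAIM (what is proved, stated in full; the proofs are below) =====
def Claim_equal_mcculloch : Prop := ∀ (digits : String), Dom_mcculloch digits → Spec_mcculloch digits (mcculloch digits)

-- ===== LEMMAS AND PROOFS =====

def bAux (ds : List Char) : Option (List Char) :=
  match scanB ds with
  | (_, none) => none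
  | (ops, some v) => some (ops.reverse.foldl applyOp v)

theorem applyOp_ne_nil (v : List Char) (op : Char) (hv : v ≠ []) : applyOp v op ≠ [] := by
  unfold applyOp
  split_ifs <;> simp_all

theorem mccA_eq_bAux : ∀ ds : List Char, mccA ds = bAux ds ∧ ∀ v, bAux ds = some v → v ≠ [] := by
  intro ds
  induction ds with
  | nil => simp [mccA, bAux, scanB]
  | cons h t ih =>
    cases t with
    | nil => simp [mccA, bAux, scanB]
    | cons h2 t2 =>
      obtain ⟨ihEq, ihNe⟩ := ih
      by_cases h2c : h = '2'
      · subst h2c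
        constructor
        · simp [mccA, bAux, scanB]
        · intro v hv
          simp [bAux, scanB] at hv
          simp [← hv]
      · by_cases hop : h = '3' ∨ h = '4' ∨ h = '5'
        · have unfB : scanB (h :: h2 :: t2) =
            ((h :: (scanB (h2 :: t2)).1, (scanB (h2 :: t2)).2)) := by
            simp [scanB, h2c, hop]
          cases hv : (scanB (h2 :: t2)).2 with
          | none =>
            have hb : bAux (h2 :: t2) = none := by
              simp [bAux]
              cases hs : scanB (h2 :: t2) with
              | mk a b => rw [hs] at hv; simp at hv; simp [hv]
            constructor
            · rw [show mccA (h :: h2 :: t2) =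
                (if h = '2' then some (h2 :: t2)
                 else if h = '3' ∨ h = '4' ∨ h = '5' then
                   match mccA (h2 :: t2) with
                   | some v =>
                     if v.isEmpty then none
                     else if h = '3' then some (v ++ '2' :: v)
                     else if h = '4' then some v.reverse
                     else some (v ++ v)
                   | none => none
                 else none) from rfl]
              rw [ihEq, hb]
              simp [h2c, hop, bAux, unfB, hv]
            · intro v hv'
              simp [bAux, unfB, hv] at hv'
          | some v0 =>
            have hb : bAux (h2 :: t2) = some ((scanB (h2 :: t2)).1.reverse.foldl applyOp v0) := by
              simp [bAux]
              cases hs : scanB (h2 :: t2) with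
              | mk a b => rw [hs] at hv; simp at hv; simp [hv]
            set w := (scanB (h2 :: t2)).1.reverse.foldl applyOp v0 with hw
            have hwne : w ≠ [] := ihNe w hb
            have hbc : bAux (h :: h2 :: t2) = some (applyOp w h) := by
              simp [bAux, unfB, hv, hw]
            constructor
            · rw [show mccA (h :: h2 :: t2) =
                (if h = '2' then some (h2 :: t2)
                 else if h = '3' ∨ h = '4' ∨ h = '5' then
                   match mccA (h2 :: t2) with
                   | some v =>
                     if v.isEmpty then none
                     else if h = '3' then some (v ++ '2' :: v)
                     else if h = '4' then some v.reverse
                     else some (v ++ v)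
                   | none => none
                 else none) from rfl]
              rw [ihEq, hb, hbc]
              have : w.isEmpty = false := by simp [hwne]
              simp only [h2c, if_false, hop, if_true, this, Bool.false_eq_true]
              unfold applyOp
              rcases hop with h3 | h4 | h5 <;> subst_vars <;> simp
            · intro v hv'
              rw [hbc] at hv'
              have := applyOp_ne_nil w h hwne
              simp_all
        · constructor
          · simp [mccA, bAux, scanB, h2c, hop]
          · intro v hv'
            simp [bAux, scanB, h2c, hop] at hv'

-- ===== VERDICT (by name: the statement is the Claim_ definition above) =====
theorem mcculloch_spec : Claim_equal_mcculloch := by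
  intro digits _
  unfold Spec_mcculloch mcculloch mcculloch_alt
  rw [(mccA_eq_bAux digits.toList).1]
  unfold bAux
  cases hs : scanB digits.toList with
  | mk a b => cases b <;> simp
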